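-- pv_equiv track=rewrite | github.com/architgore050/Vityarthi-Project | 31.py | lucasSequence_stepsCounter
-- ===== SOURCE A (Python) =====
-- def lucasSequence_stepsCounter (a, n):
--     l = [2, 1]
--     steps=1
--
--     i = 2
--     steps+=1
--
--     steps+=1
--     while i < n:
--         steps+=1
--
--         l.append(l[-1]+l[-2])
--         steps+=4
--
--         i+=1
--         steps+=2
--
--     l.append(0)
--     steps+=1
--
--     output = l[:n]
--     steps+=2
--
--     return steps
-- ===== SOURCE B (Python) =====
-- def lucasSequence_stepsCounter(a, n):
--     # closed form: 6 fixed steps plus 7 per loop iteration (max(0, n-2) iterations)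
--     return 6 + 7 * max(0, n - 2)
-- ===== Notes on version B (the rewrite author's own statement) =====
-- stated objective: faster
-- what changed: Replaced the loop that builds the Lucas list while counting steps by the closed form 6 + 7*max(0, n-2).
import Mathlib
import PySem

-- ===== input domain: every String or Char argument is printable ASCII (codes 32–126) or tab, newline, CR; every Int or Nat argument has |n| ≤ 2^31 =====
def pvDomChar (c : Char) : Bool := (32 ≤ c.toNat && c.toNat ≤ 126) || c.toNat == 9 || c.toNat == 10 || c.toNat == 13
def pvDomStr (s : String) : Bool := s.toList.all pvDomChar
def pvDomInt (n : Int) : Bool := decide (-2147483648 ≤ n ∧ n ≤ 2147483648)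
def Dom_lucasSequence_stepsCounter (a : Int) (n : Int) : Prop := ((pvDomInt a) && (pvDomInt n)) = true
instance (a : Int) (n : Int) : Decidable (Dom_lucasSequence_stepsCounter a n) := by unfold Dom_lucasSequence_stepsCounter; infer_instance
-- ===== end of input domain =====

-- B replaces A's step-counting loop by the closed form 6 + 7*max(0, n-2) (O(1) vs O(n)).

-- ===== PORT A =====
-- the while loop plus the code after it (append 0, slice, return steps)
def lucasLoopA (n : Int) (l : List Int) (steps : Int) (i : Int) : Int :=
  if i < n then
    lucasLoopA n
      (l ++ [((PySem.List.pyGet? l (-1)).getD 0) + ((PySem.List.pyGet? l (-2)).getD 0)])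
      (steps + 1 + 4 + 2) (i + 1)
  else
    -- l.append(0); steps+=1; output = l[:n]; steps+=2; return steps
    let l' := l ++ [(0 : Int)]
    let _output := PySem.List.slice l' none (some n)
    steps + 1 + 2
termination_by (n - i).toNat
decreasing_by omega

def lucasSequence_stepsCounter (a : Int) (n : Int) : Int :=
  lucasLoopA n [2, 1] (1 + 1 + 1) 2

-- ===== PORT B =====
def lucasSequence_stepsCounter_alt (a : Int) (n : Int) : Int :=
  6 + 7 * max 0 (n - 2)

-- ===== PRECONDITION & SPEC =====
def Spec_lucasSequence_stepsCounter (a : Int) (n : Int) (out : Int) : Prop := out = lucasSequence_stepsCounter_alt a n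
instance (a : Int) (n : Int) (out : Int) : Decidable (Spec_lucasSequence_stepsCounter a n out) := by unfold Spec_lucasSequence_stepsCounter; infer_instance

-- ===== CLAIM (what is proved, stated in full; the proofs are below) =====
def Claim_equal_lucasSequence_stepsCounter : Prop := ∀ (a : Int) (n : Int), Dom_lucasSequence_stepsCounter a n → Spec_lucasSequence_stepsCounter a n (lucasSequence_stepsCounter a n)

-- ===== LEMMAS AND PROOFS =====
theorem lucasLoopA_eq (k : ℕ) : ∀ (n i steps : Int) (l : List Int),
    (n - i).toNat = k → lucasLoopA n l steps i = steps + 7 * ((n - i).toNat : Int) + 3 := by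
  induction k with
  | zero =>
    intro n i steps l hk
    rw [lucasLoopA]
    have h : ¬ i < n := by omega
    simp only [h, if_false, hk]
    omega
  | succ k ih =>
    intro n i steps l hk
    rw [lucasLoopA]
    have h : i < n := by omega
    simp only [h, if_true]
    rw [ih n (i + 1) _ _ (by omega)]
    omega

-- ===== VERDICT (by name: the statement is the Claim_ definition above) =====
theorem lucasSequence_stepsCounter_spec : Claim_equal_lucasSequence_stepsCounter := by
  intro a n _
  unfold Spec_lucasSequence_stepsCounter lucasSequence_stepsCounter lucasSequence_stepsCounter_alt
  rw [lucasLoopA_eq (n - 2).toNat n 2 _ _ rfl]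
  omega
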